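-- pv_equiv track=rewrite | github.com/dost4/advent_of_code | day14.py | day_forward_dictionary
-- ===== SOURCE A (Python) =====
-- from typing import Dict
--
-- def day_forward_dictionary(section_count: Dict[str, int], path_changes: Dict[str, str]) -> Dict[str, int]:
-- 	new_section_count = {}
-- 	for section, c in section_count.items():
-- 		new_sections = path_changes.get(section, [])
-- 		for new_section in new_sections:
-- 			n = new_section_count.get(new_section, 0)
-- 			new_section_count[new_section] = c + n
--
--
-- 	return new_section_count
-- ===== SOURCE B (Python) =====
-- def day_forward_dictionary(section_count, path_changes):
--     new_section_count = {}
--     for section, c in section_count.items():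
--         mapped = path_changes.get(section, "")
--         # frequency table of the mapped string, then scale each multiplicity by c
--         freq = {}
--         for ch in mapped:
--             freq[ch] = freq.get(ch, 0) + 1
--         for ch, m in freq.items():
--             new_section_count[ch] = new_section_count.get(ch, 0) + c * m
--     return new_section_count
-- ===== Notes on version B (the rewrite author's own statement) =====
-- stated objective: alternative
-- what changed: Instead of adding c once per character of the mapped string, B first builds a per-section frequency table of the mapped string and then adds c times each character's multiplicity, so the inner accumulation runs over distinct characters with counts rather than over every character occurrence.
import Mathlib
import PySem

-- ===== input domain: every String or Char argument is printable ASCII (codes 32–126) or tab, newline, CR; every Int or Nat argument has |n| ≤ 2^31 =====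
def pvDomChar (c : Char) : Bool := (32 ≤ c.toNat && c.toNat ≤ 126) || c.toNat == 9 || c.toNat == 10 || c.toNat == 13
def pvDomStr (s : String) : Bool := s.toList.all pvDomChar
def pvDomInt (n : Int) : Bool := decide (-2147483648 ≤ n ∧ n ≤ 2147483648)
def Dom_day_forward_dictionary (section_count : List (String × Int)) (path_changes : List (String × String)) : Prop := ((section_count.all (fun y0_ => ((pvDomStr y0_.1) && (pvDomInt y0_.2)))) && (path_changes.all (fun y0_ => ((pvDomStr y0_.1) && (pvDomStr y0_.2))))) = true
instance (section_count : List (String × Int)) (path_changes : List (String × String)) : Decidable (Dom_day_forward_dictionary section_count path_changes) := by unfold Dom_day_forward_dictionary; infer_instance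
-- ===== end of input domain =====

-- B replaces A's add-c-per-character inner loop by a per-section frequency table whose
-- multiplicities are scaled by c (alternative decomposition; same asymptotic cost).

-- ===== PORT A =====
-- element-by-element: for each mapped character, add c to its running total
def day_forward_dictionary (section_count : List (String × Int)) (path_changes : List (String × String)) : List (String × Int) :=
  (section_count.foldl
    (fun new_section_count p =>
      match (PySem.Dict.ofList path_changes).get? p.1 with
      | none => new_section_count      -- .get(section, []) : iterating the default [] does nothing
      | some new_sections =>
          new_sections.toList.foldl
            (fun new_section_count new_section =>
              new_section_count.insert (String.ofList [new_section])
                (p.2 + new_section_count.getD (String.ofList [new_section]) 0))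
            new_section_count)
    PySem.Dict.empty).items

-- ===== PORT B =====
-- per-section frequency table (a hand-rolled counter), then add c * multiplicity per distinct character
def day_forward_dictionary_alt (section_count : List (String × Int)) (path_changes : List (String × String)) : List (String × Int) :=
  (section_count.foldl
    (fun new p =>
      let mapped := (PySem.Dict.ofList path_changes).getD p.1 ""
      let freq := mapped.toList.foldl (fun fr ch => fr.insert ch (fr.getD ch 0 + 1)) PySem.Dict.empty
      freq.items.foldl
        (fun new q => new.insert (String.ofList [q.1]) (new.getD (String.ofList [q.1]) 0 + p.2 * q.2))
        new)
    PySem.Dict.empty).items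

-- ===== PRECONDITION & SPEC =====
def Spec_day_forward_dictionary (section_count : List (String × Int)) (path_changes : List (String × String)) (out : List (String × Int)) : Prop := out = day_forward_dictionary_alt section_count path_changes
instance (section_count : List (String × Int)) (path_changes : List (String × String)) (out : List (String × Int)) : Decidable (Spec_day_forward_dictionary section_count path_changes out) := by unfold Spec_day_forward_dictionary; infer_instance

-- ===== CLAIM (what is proved, stated in full; the proofs are below) =====
def Claim_equal_day_forward_dictionary : Prop := ∀ (section_count : List (String × Int)) (path_changes : List (String × String)), Dom_day_forward_dictionary section_count path_changes → Spec_day_forward_dictionary section_count path_changes (day_forward_dictionary section_count path_changes)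

-- ===== LEMMAS AND PROOFS =====

-- the key map: a Python character is a 1-character string
theorem pvF_inj : Function.Injective (fun ch => String.ofList [ch]) := by
  intro a b h
  have h2 := congrArg String.toList h
  simpa using h2

-- Set.add appends when the element is absent
theorem set_add_of_not_mem {α : Type} [BEq α] [LawfulBEq α] (s : PySem.Set α) (x : α)
    (h : x ∉ s) : s.add x = s ++ [x] := by
  simp only [PySem.Set.add, if_neg (fun hcc => h ((PySem.Set.contains_iff s x).1 hcc))]

-- updating with an already-deduplicated prefix composes
theorem set_update_update {α : Type} [BEq α] [LawfulBEq α] :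
    ∀ (l : List α) (s u : PySem.Set α), s.update (u.update l) = (s.update u).update l := by
  intro l
  induction l with
  | nil => intro s u; rw [PySem.Set.update_nil, PySem.Set.update_nil]
  | cons x l ih =>
      intro s u
      rw [PySem.Set.update_cons, ih, PySem.Set.update_cons]
      congr 1
      by_cases hx : x ∈ u
      · rw [PySem.Set.add_of_mem hx,
          PySem.Set.add_of_mem ((PySem.Set.mem_update s u x).2 (Or.inr hx))]
      · rw [set_add_of_not_mem u x hx, PySem.Set.update_append, PySem.Set.update_cons,
          PySem.Set.update_nil]

-- deduplicating the update list does not change the update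
theorem set_update_dedup {α : Type} [BEq α] [LawfulBEq α] (s : PySem.Set α) (l : List α) :
    s.update (PySem.List.dedup l) = s.update l := by
  have h1 : PySem.List.dedup l = PySem.Set.empty.update l := by
    rw [PySem.Set.update_empty]; rfl
  rw [h1, set_update_update]
  have h2 : s.update PySem.Set.empty = s := PySem.Set.update_nil s
  rw [h2]

-- dedup commutes with mapping an injective function
theorem set_update_map_inj {α β : Type} [BEq α] [LawfulBEq α] [BEq β] [LawfulBEq β]
    {f : α → β} (hf : Function.Injective f) :
    ∀ (l : List α) (u : PySem.Set α), (u.update l).map f = PySem.Set.update (u.map f) (l.map f) := by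
  intro l
  induction l with
  | nil => intro u; rw [List.map_nil, PySem.Set.update_nil, PySem.Set.update_nil]
  | cons x l ih =>
      intro u
      rw [List.map_cons, PySem.Set.update_cons, PySem.Set.update_cons, ih]
      congr 1
      by_cases hx : x ∈ u
      · rw [PySem.Set.add_of_mem hx, PySem.Set.add_of_mem (List.mem_map_of_mem hx)]
      · have hfx : f x ∉ u.map f := by
          intro hmem
          rcases List.mem_map.1 hmem with ⟨y, hy, hyx⟩
          exact hx (hf hyx ▸ hy)
        rw [set_add_of_not_mem u x hx, set_add_of_not_mem (u.map f) (f x) hfx, List.map_append]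
        rfl

theorem dedup_map_inj {α β : Type} [BEq α] [LawfulBEq α] [BEq β] [LawfulBEq β]
    {f : α → β} (hf : Function.Injective f) (l : List α) :
    PySem.List.dedup (l.map f) = (PySem.List.dedup l).map f := by
  have h1 : PySem.List.dedup l = PySem.Set.empty.update l := by
    rw [PySem.Set.update_empty]; rfl
  have h2 : PySem.List.dedup (l.map f) = PySem.Set.empty.update (l.map f) := by
    rw [PySem.Set.update_empty]; rfl
  rw [h1, h2, set_update_map_inj hf]
  rfl

-- lookup misses when the key is not among the firsts
theorem get?_mk_none {κ ν : Type} [BEq κ] [LawfulBEq κ] :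
    ∀ (t : List (κ × ν)) (x : κ), x ∉ t.map Prod.fst → (PySem.Dict.mk t).get? x = none := by
  intro t
  induction t with
  | nil => intro x _; rfl
  | cons p t ih =>
      intro x hx
      obtain ⟨k, v⟩ := p
      rw [PySem.Dict.get?_mk_cons]
      have hk : (k == x) = false := by
        simp only [List.map_cons, List.mem_cons, not_or] at hx
        exact beq_eq_false_iff_ne.2 fun h => hx.1 h.symm
      rw [hk]
      exact ih x (by simp only [List.map_cons, List.mem_cons, not_or] at hx; exact hx.2)

-- a dict is determined by its key list (nodup) and its lookups
theorem assoc_ext {κ ν : Type} [BEq κ] [LawfulBEq κ] :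
    ∀ (l1 l2 : List (κ × ν)) (v0 : ν),
      l1.map Prod.fst = l2.map Prod.fst → (l1.map Prod.fst).Nodup →
      (∀ k, (PySem.Dict.mk l1).getD k v0 = (PySem.Dict.mk l2).getD k v0) → l1 = l2 := by
  intro l1
  induction l1 with
  | nil =>
      intro l2 v0 hk _ _
      exact (List.map_eq_nil_iff.1 hk.symm).symm
  | cons p t1 ih =>
      intro l2 v0 hk hn hg
      obtain ⟨k, v⟩ := p
      cases l2 with
      | nil => exact absurd hk (by simp)
      | cons q t2 =>
          obtain ⟨k', v'⟩ := q
          simp only [List.map_cons, List.cons.injEq] at hk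
          obtain ⟨hkk, htk⟩ := hk
          subst hkk
          have hv : v = v' := by
            have := hg k
            simp only [PySem.Dict.getD, PySem.Dict.get?_mk_cons, beq_self_eq_true,
              if_true, Option.getD_some] at this
            exact this
          subst hv
          have hn' : (t1.map Prod.fst).Nodup := (List.nodup_cons.1 hn).2
          have hknot : k ∉ t1.map Prod.fst := (List.nodup_cons.1 hn).1
          have hknot2 : k ∉ t2.map Prod.fst := htk ▸ hknot
          have hg' : ∀ x, (PySem.Dict.mk t1).getD x v0 = (PySem.Dict.mk t2).getD x v0 := by
            intro x
            by_cases hx : k = x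
            · subst hx
              simp only [PySem.Dict.getD, get?_mk_none t1 k hknot, get?_mk_none t2 k hknot2]
            · have := hg x
              have hb : (k == x) = false := beq_eq_false_iff_ne.2 hx
              simp only [PySem.Dict.getD, PySem.Dict.get?_mk_cons, hb] at this
              exact this
          rw [ih t2 v0 htk hn' hg']

theorem dict_ext_getD {κ ν : Type} [BEq κ] [LawfulBEq κ] (d1 d2 : PySem.Dict κ ν) (v0 : ν)
    (hk : d1.keys = d2.keys) (hn : d1.keys.Nodup)
    (hg : ∀ k, d1.getD k v0 = d2.getD k v0) : d1 = d2 := by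
  obtain ⟨l1⟩ := d1
  obtain ⟨l2⟩ := d2
  apply PySem.Dict.ext
  exact assoc_ext l1 l2 v0 hk hn hg

-- value of A's inner fold
theorem getA (c : Int) :
    ∀ (l : List Char) (d : PySem.Dict String Int) (k : String),
      (l.foldl (fun d ch => d.insert (String.ofList [ch]) (c + d.getD (String.ofList [ch]) 0)) d).getD k 0
        = d.getD k 0 + c * ((l.map (fun ch => String.ofList [ch])).count k : Int) := by
  intro l
  induction l with
  | nil => intro d k; simp
  | cons x l ih =>
      intro d k
      rw [List.foldl_cons, ih, PySem.Dict.getD_insert]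
      simp only [List.map_cons, List.count_cons]
      by_cases hx : k = String.ofList [x]
      · subst hx
        simp only [beq_self_eq_true, if_true]
        push_cast
        ring
      · have hb : (String.ofList [x] == k) = false :=
          beq_eq_false_iff_ne.2 (fun hh => hx (Eq.symm hh))
        simp only [if_neg hx, hb, Bool.false_eq_true, if_false]
        push_cast
        ring

-- value of B's inner fold
theorem getB (c : Int) :
    ∀ (items : List (Char × Int)) (d : PySem.Dict String Int) (k : String),
      (items.foldl (fun d q => d.insert (String.ofList [q.1]) (d.getD (String.ofList [q.1]) 0 + c * q.2)) d).getD k 0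
        = d.getD k 0 + (items.map (fun q => if String.ofList [q.1] = k then c * q.2 else 0)).sum := by
  intro items
  induction items with
  | nil => intro d k; simp
  | cons q items ih =>
      intro d k
      rw [List.foldl_cons, ih, PySem.Dict.getD_insert]
      simp only [List.map_cons, List.sum_cons]
      by_cases hx : k = String.ofList [q.1]
      · rw [if_pos hx, if_pos (Eq.symm hx), hx]
        ring
      · rw [if_neg hx, if_neg (fun h => hx (Eq.symm h))]
        ring

-- sum over distinct elements with one indicator survivor
theorem sum_ite_eq_nodup :
    ∀ (D : List Char), D.Nodup → ∀ (x₀ : Char) (g : Char → Int),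
      (D.map (fun x => if x = x₀ then g x else 0)).sum = if x₀ ∈ D then g x₀ else 0 := by
  intro D
  induction D with
  | nil => intro _ x₀ g; simp
  | cons y D ih =>
      intro hD x₀ g
      obtain ⟨hy, hD'⟩ := List.nodup_cons.1 hD
      rw [List.map_cons, List.sum_cons, ih hD' x₀ g]
      by_cases hxy : y = x₀
      · subst hxy
        rw [if_pos rfl, if_neg hy, if_pos (List.mem_cons_self)]
        ring
      · rw [if_neg hxy]
        by_cases hm : x₀ ∈ D
        · rw [if_pos hm, if_pos (List.mem_cons_of_mem y hm)]
          ring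
        · rw [if_neg hm, if_neg (by
            intro h
            rcases List.mem_cons.1 h with h | h
            · exact hxy h.symm
            · exact hm h)]
          ring

-- the scaled multiplicities over the distinct characters total the per-occurrence sum
theorem sum_dedup_count (c : Int) (l : List Char) (k : String) :
    ((PySem.List.dedup l).map (fun x => if String.ofList [x] = k then c * (l.count x : Int) else 0)).sum
      = c * ((l.map (fun ch => String.ofList [ch])).count k : Int) := by
  by_cases h : ∃ x₀, x₀ ∈ l ∧ String.ofList [x₀] = k
  · obtain ⟨x₀, hx₀, hfx₀⟩ := h
    have hiff : ∀ x : Char, (String.ofList [x] = k) ↔ (x = x₀) := by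
      intro x
      constructor
      · intro hx; exact pvF_inj (hx.trans hfx₀.symm)
      · intro hx; subst hx; exact hfx₀
    have hfun : (fun x => if String.ofList [x] = k then c * (l.count x : Int) else 0)
        = (fun x => if x = x₀ then c * (l.count x : Int) else 0) := by
      funext x
      by_cases hx : x = x₀
      · rw [if_pos ((hiff x).2 hx), if_pos hx]
      · rw [if_neg (fun hh => hx ((hiff x).1 hh)), if_neg hx]
    rw [hfun, sum_ite_eq_nodup (PySem.List.dedup l) (PySem.List.nodup_dedup l) x₀,
      if_pos ((PySem.List.mem_dedup l x₀).2 hx₀)]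
    have hc : (l.map (fun ch => String.ofList [ch])).count k = l.count x₀ := by
      rw [← hfx₀]
      exact List.count_map_of_injective l _ pvF_inj x₀
    rw [hc]
  · push_neg at h
    have hz : ((PySem.List.dedup l).map
        (fun x => if String.ofList [x] = k then c * (l.count x : Int) else 0)).sum = 0 := by
      apply List.sum_eq_zero
      intro y hy
      rcases List.mem_map.1 hy with ⟨x, hx, hxy⟩
      rw [if_neg (h x ((PySem.List.mem_dedup l x).1 hx))] at hxy
      exact hxy.symm
    have hc : (l.map (fun ch => String.ofList [ch])).count k = 0 := by
      apply List.count_eq_zero.2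
      intro hmem
      rcases List.mem_map.1 hmem with ⟨x, hx, hxk⟩
      exact h x hx hxk
    rw [hz, hc]
    simp

-- per-section equality of the two inner loops
theorem core (c : Int) (l : List Char) (d : PySem.Dict String Int) (hn : d.keys.Nodup) :
    (l.foldl (fun d ch => d.insert (String.ofList [ch]) (c + d.getD (String.ofList [ch]) 0)) d)
      = ((PySem.Dict.counter l).items.foldl
          (fun d q => d.insert (String.ofList [q.1]) (d.getD (String.ofList [q.1]) 0 + c * q.2)) d) := by
  apply dict_ext_getD _ _ (0 : Int)
  · -- keys
    rw [PySem.Dict.keys_foldl_insert_key l (fun ch => String.ofList [ch])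
      (fun d ch => c + d.getD (String.ofList [ch]) 0) d]
    rw [PySem.Dict.keys_foldl_insert_key (PySem.Dict.counter l).items (fun q => String.ofList [q.1])
      (fun d q => d.getD (String.ofList [q.1]) 0 + c * q.2) d]
    rw [PySem.Dict.items_counter]
    have hmaps : ((PySem.Set.ofList l).map (fun k => (k, (l.count k : Int)))).map
        (fun q => String.ofList [q.1]) = (PySem.List.dedup l).map (fun ch => String.ofList [ch]) := by
      rw [List.map_map]; rfl
    rw [hmaps, ← dedup_map_inj pvF_inj, set_update_dedup]
  · -- nodup keys of the left fold
    exact PySem.Dict.nodup_keys_foldl_insert_key l (fun ch => String.ofList [ch])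
      (fun d ch => c + d.getD (String.ofList [ch]) 0) d hn
  · -- values
    intro k
    rw [getA c l d k, getB c (PySem.Dict.counter l).items d k, PySem.Dict.items_counter,
      List.map_map]
    have : ((PySem.Set.ofList l).map
        ((fun q : Char × Int => if String.ofList [q.1] = k then c * q.2 else 0) ∘
          fun x => (x, (l.count x : Int)))).sum
        = ((PySem.List.dedup l).map
            (fun x => if String.ofList [x] = k then c * (l.count x : Int) else 0)).sum := rfl
    rw [this, sum_dedup_count c l k]

-- the two outer folds agree from any nodup-keyed accumulator
theorem main_fold (path_changes : List (String × String)) :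
    ∀ (sc : List (String × Int)) (d : PySem.Dict String Int), d.keys.Nodup →
      sc.foldl
        (fun new_section_count p =>
          match (PySem.Dict.ofList path_changes).get? p.1 with
          | none => new_section_count
          | some new_sections =>
              new_sections.toList.foldl
                (fun new_section_count new_section =>
                  new_section_count.insert (String.ofList [new_section])
                    (p.2 + new_section_count.getD (String.ofList [new_section]) 0))
                new_section_count) d
      = sc.foldl
          (fun new p =>
            let mapped := (PySem.Dict.ofList path_changes).getD p.1 ""
            let freq := mapped.toList.foldl (fun fr ch => fr.insert ch (fr.getD ch 0 + 1))
              PySem.Dict.empty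
            freq.items.foldl
              (fun new q => new.insert (String.ofList [q.1]) (new.getD (String.ofList [q.1]) 0 + p.2 * q.2))
              new) d := by
  intro sc
  induction sc with
  | nil => intro d _; rfl
  | cons p sc ih =>
      intro d hn
      rw [List.foldl_cons, List.foldl_cons]
      cases hq : (PySem.Dict.ofList path_changes).get? p.1 with
      | none =>
          have hB : ((PySem.Dict.ofList path_changes).getD p.1 "") = "" := by
            simp [PySem.Dict.getD, hq]
          simp only [hB]
          exact ih d hn
      | some s =>
          have hB : ((PySem.Dict.ofList path_changes).getD p.1 "") = s := by
            simp [PySem.Dict.getD, hq]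
          simp only [hB]
          rw [PySem.Dict.foldl_insert_getD_add_one_eq_counter s.toList]
          rw [core p.2 s.toList d hn]
          apply ih
          rw [← core p.2 s.toList d hn]
          exact PySem.Dict.nodup_keys_foldl_insert_key s.toList (fun ch => String.ofList [ch])
            (fun d ch => p.2 + d.getD (String.ofList [ch]) 0) d hn

-- ===== VERDICT (by name: the statement is the Claim_ definition above) =====
theorem day_forward_dictionary_spec : Claim_equal_day_forward_dictionary := by
  intro section_count path_changes _
  unfold Spec_day_forward_dictionary day_forward_dictionary day_forward_dictionary_alt
  exact congrArg PySem.Dict.items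
    (main_fold path_changes section_count PySem.Dict.empty (PySem.Dict.nodup_keys_empty))
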